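-- pv_equiv track=rewrite | github.com/54TH15H/PYTHON | infy2.py | countDivisibleSubseq
-- ===== SOURCE A (Python) =====
-- from itertools import product
--
-- def countDivisibleSubseq(N,Arr):
--     slices=[]
--     for doslice in product([True,False], repeat=len(Arr)-1):
--         start=0
--         for i, slicehere in enumerate (doslice,1):
--             if slicehere:
--                 slices.append(Arr[start:i])
--                 start=i
--         slices.append(Arr[start:])
--     count=len(set(Arr))
--     for i in range(len(slices)):
--         if len(slices[i])>=1:
--             for j in range(len(slices[i])-1,0,-1): #2,0,-1
--                     if slices[i][j] % slices[i][j-1]==0: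
--                         count+=1
--     return count
-- ===== SOURCE B (Python) =====
-- def countDivisibleSubseq(N, Arr):
--     # closed form: each divisible adjacent pair lies in one piece in exactly
--     # 2^(len(Arr)-2) of the 2^(len(Arr)-1) contiguous slicings
--     distinct = len(set(Arr))
--     n = len(Arr)
--     if n < 2:
--         return distinct
--     p = sum(1 for a, b in zip(Arr, Arr[1:]) if b % a == 0)
--     return distinct + p * 2 ** (n - 2)
-- ===== Notes on version B (the rewrite author's own statement) =====
-- stated objective: faster
-- what changed: Replaces the enumeration of all 2^(n-1) contiguous slicings with a closed form: len(set(Arr)) plus (number of adjacent pairs with Arr[i+1] % Arr[i] == 0) * 2^(n-2), since each such pair stays inside one piece in exactly 2^(n-2) slicings.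
import Mathlib
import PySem

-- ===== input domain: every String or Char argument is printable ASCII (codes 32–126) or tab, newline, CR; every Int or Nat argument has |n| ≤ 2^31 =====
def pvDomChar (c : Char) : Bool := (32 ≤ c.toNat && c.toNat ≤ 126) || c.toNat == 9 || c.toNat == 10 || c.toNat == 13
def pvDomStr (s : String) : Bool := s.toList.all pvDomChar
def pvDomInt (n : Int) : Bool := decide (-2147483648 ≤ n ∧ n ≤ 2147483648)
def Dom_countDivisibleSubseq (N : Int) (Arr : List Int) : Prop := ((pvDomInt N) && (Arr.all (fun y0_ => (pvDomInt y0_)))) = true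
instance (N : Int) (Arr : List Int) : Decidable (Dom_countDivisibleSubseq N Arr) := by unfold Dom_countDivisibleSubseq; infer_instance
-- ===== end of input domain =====

-- B replaces A's enumeration of all 2^(n-1) contiguous slicings by a closed form
-- (each divisible adjacent pair lies inside one piece in exactly 2^(n-2) slicings): faster.

-- ===== PORT A =====
-- itertools.product([True,False], repeat=k), in Python's order (first coordinate slowest, True first)
def prodTF : Nat → List (List Bool)
  | 0 => [[]]
  | k + 1 => [true, false].flatMap (fun b => (prodTF k).map (fun t => b :: t))

-- the inner 'for i, slicehere in enumerate(doslice, 1)' loop: state = (slices, start)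
def buildLoop (Arr : List Int) : List (Int × Bool) → List (List Int) → Int → List (List Int) × Int
  | [], acc, start => (acc, start)
  | (i, b) :: rest, acc, start =>
    if b then buildLoop Arr rest (acc ++ [PySem.List.slice Arr (some start) (some i)]) i
    else buildLoop Arr rest acc start

-- one doslice iteration: run the loop, then slices.append(Arr[start:])
def slicesFor (Arr : List Int) (acc : List (List Int)) (d : List Bool) : List (List Int) :=
  let r := buildLoop Arr (PySem.List.enumerate d 1) acc 0
  r.1 ++ [PySem.List.slice Arr (some r.2) none]

-- 'for j in range(len(s)-1, 0, -1): if s[j] % s[j-1] == 0: count += 1'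
def innerLoop (s : List Int) (c : Int) : Int :=
  (PySem.List.pyRange ((s.length : Int) - 1) 0 (-1)).foldl
    (fun c j =>
      if PySem.Int.mod (PySem.List.pyGetD s j 0) (PySem.List.pyGetD s (j - 1) 0) == 0 then c + 1
      else c) c

def countDivisibleSubseq (N : Int) (Arr : List Int) : Int :=
  let slices := (prodTF (Arr.length - 1)).foldl (slicesFor Arr) []
  let count : Int := ((PySem.Set.ofList Arr).length : Int)
  (PySem.List.pyRange 0 (slices.length : Int) 1).foldl
    (fun c i =>
      let s := PySem.List.pyGetD slices i []
      if 1 ≤ s.length then innerLoop s c else c) count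

-- ===== PORT B =====
def countDivisibleSubseq_alt (N : Int) (Arr : List Int) : Int :=
  let distinct : Int := ((PySem.Set.ofList Arr).length : Int)
  let n := Arr.length
  if n < 2 then distinct
  else distinct +
    (((Arr.zip (Arr.drop 1)).filter (fun p => PySem.Int.mod p.2 p.1 == 0)).length : Int) * 2 ^ (n - 2)

-- ===== PRECONDITION & SPEC =====
-- Pre_ excludes exactly the inputs where A raises: Arr = [] (ValueError from product(repeat=-1))
-- and a zero anywhere but last (ZeroDivisionError in the no-cut slicing).
def Pre_countDivisibleSubseq (N : Int) (Arr : List Int) : Prop :=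
  Arr ≠ [] ∧ (0 : Int) ∉ Arr.dropLast
instance (N : Int) (Arr : List Int) : Decidable (Pre_countDivisibleSubseq N Arr) := by
  unfold Pre_countDivisibleSubseq; infer_instance
def pvWitness_countDivisibleSubseq : Int × List Int := (3, [1, 2, 4])

def Spec_countDivisibleSubseq (N : Int) (Arr : List Int) (out : Int) : Prop := out = countDivisibleSubseq_alt N Arr
instance (N : Int) (Arr : List Int) (out : Int) : Decidable (Spec_countDivisibleSubseq N Arr out) := by unfold Spec_countDivisibleSubseq; infer_instance

-- ===== CLAIM (what is proved, stated in full; the proofs are below) =====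
def Claim_equal_countDivisibleSubseq : Prop := ∀ (N : Int) (Arr : List Int), Dom_countDivisibleSubseq N Arr → Pre_countDivisibleSubseq N Arr → Spec_countDivisibleSubseq N Arr (countDivisibleSubseq N Arr)

-- ===== LEMMAS AND PROOFS =====

def adjP : Int × Int → Bool := fun p => PySem.Int.mod p.2 p.1 == 0

def adjC (s : List Int) : Nat := (s.zip s.tail).countP adjP

def sumAdj (L : List (List Int)) : Nat := (L.map adjC).sum

-- splitRec xs d: cut xs into pieces, d[i] = cut between xs[i] and xs[i+1]
def splitRec : List Int → List Bool → List (List Int)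
  | xs, [] => [xs]
  | [], _ :: _ => [[]]
  | x :: xs, true :: d => [x] :: splitRec xs d
  | x :: xs, false :: d =>
    match splitRec xs d with
    | [] => [[x]]
    | s :: rest => (x :: s) :: rest

def glue (p : List Int) : List (List Int) → List (List Int)
  | [] => [p]
  | s :: r => (p ++ s) :: r

theorem splitRec_ne_nil (xs : List Int) (d : List Bool) : splitRec xs d ≠ [] := by
  match xs, d with
  | xs, [] => simp [splitRec]
  | [], _ :: _ => simp [splitRec]
  | x :: xs, true :: d => simp [splitRec]
  | x :: xs, false :: d =>
    simp only [splitRec]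
    split <;> simp

theorem splitRec_cons (d : List Bool) (x : Int) (xs : List Int) :
    ∃ t rest, splitRec (x :: xs) d = (x :: t) :: rest := by
  induction d generalizing x xs with
  | nil => exact ⟨xs, [], rfl⟩
  | cons b d ih =>
    cases b with
    | true => exact ⟨[], splitRec xs d, rfl⟩
    | false =>
      cases xs with
      | nil => exact ⟨[], [], by simp [splitRec]; cases d <;> simp [splitRec]⟩
      | cons y ys =>
        obtain ⟨t, rest, ht⟩ := ih y ys
        exact ⟨y :: t, rest, by simp [splitRec, ht]⟩

theorem slice_self (Arr : List Int) (a : Int) :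
    PySem.List.slice Arr (some a) (some a) = [] := by
  have h := PySem.List.length_slice Arr a a
  exact List.eq_nil_of_length_eq_zero (by omega)

theorem slice_snoc (Arr : List Int) (s j : Nat) (hsj : s ≤ j) (hj : j < Arr.length) :
    PySem.List.slice Arr (some (s : Int)) (some (j : Int)) ++ [Arr[j]] =
      PySem.List.slice Arr (some (s : Int)) (some ((j : Int) + 1)) := by
  have hc : ((j : Int) + 1) = ((j + 1 : Nat) : Int) := by push_cast; ring
  rw [hc, PySem.List.slice_natCast, PySem.List.slice_natCast]
  have h1 : j + 1 - s = (j - s) + 1 := by omega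
  rw [h1, List.take_add_one]
  have h2 : (Arr.drop s)[j - s]? = some Arr[j] := by
    rw [List.getElem?_drop]
    have : s + (j - s) = j := by omega
    rw [this, List.getElem?_eq_getElem hj]
  simp [h2]

theorem slice_append_drop (Arr : List Int) (s j : Nat) (hsj : s ≤ j) (hj : j ≤ Arr.length) :
    PySem.List.slice Arr (some (s : Int)) (some (j : Int)) ++ Arr.drop j = Arr.drop s := by
  rw [PySem.List.slice_natCast]
  have h1 : Arr.drop j = (Arr.drop s).drop (j - s) := by
    rw [List.drop_drop]
    congr 1
    omega
  rw [h1, List.take_append_drop]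

theorem buildLoop_spec (Arr : List Int) : ∀ (d : List Bool) (j s : Nat) (acc : List (List Int)),
    s ≤ j → j + d.length + 1 = Arr.length →
    (buildLoop Arr (PySem.List.enumerate d ((j : Int) + 1)) acc (s : Int)).1 ++
      [PySem.List.slice Arr (some (buildLoop Arr (PySem.List.enumerate d ((j : Int) + 1)) acc (s : Int)).2) none] =
      acc ++ glue (PySem.List.slice Arr (some (s : Int)) (some (j : Int))) (splitRec (Arr.drop j) d) := by
  intro d
  induction d with
  | nil =>
    intro j s acc hsj h2
    simp only [PySem.List.enumerate_nil, buildLoop, glue, splitRec]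
    rw [PySem.List.slice_from_natCast,
      ← slice_append_drop Arr s j hsj (by omega)]
  | cons b d ih =>
    intro j s acc hsj h2
    have hjlt : j < Arr.length := by simp only [List.length_cons] at h2; omega
    have hdrop : Arr.drop j = Arr[j] :: Arr.drop (j + 1) := List.drop_eq_getElem_cons hjlt
    have hc : ((j : Int) + 1) = ((j + 1 : Nat) : Int) := by push_cast; ring
    have hL := splitRec_ne_nil (Arr.drop (j + 1)) d
    cases b with
    | true =>
      simp only [PySem.List.enumerate_cons, buildLoop, if_true]
      rw [show (j : Int) + 1 + 1 = ((j + 1 : Nat) : Int) + 1 by push_cast; ring]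
      rw [show (some ((j : Int) + 1)) = (some ((j + 1 : Nat) : Int)) by rw [hc]]
      rw [show ((j : Int) + 1) = ((j + 1 : Nat) : Int) from hc]
      rw [ih (j + 1) (j + 1) _ (le_refl _) (by simp only [List.length_cons] at h2; omega)]
      rw [slice_self]
      cases hsp : splitRec (Arr.drop (j + 1)) d with
      | nil => exact absurd hsp hL
      | cons t r =>
        simp only [glue, List.nil_append, hdrop, splitRec, hsp]
        rw [slice_snoc Arr s j hsj hjlt, hc]
        simp
    | false =>
      simp only [PySem.List.enumerate_cons, buildLoop, if_neg (by simp : ¬ (false = true))]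
      rw [show (j : Int) + 1 + 1 = ((j + 1 : Nat) : Int) + 1 by push_cast; ring]
      rw [ih (j + 1) s _ (by omega) (by simp only [List.length_cons] at h2; omega)]
      cases hsp : splitRec (Arr.drop (j + 1)) d with
      | nil => exact absurd hsp hL
      | cons t r =>
        simp only [hdrop, splitRec, hsp, glue]
        have hx : PySem.List.slice Arr (some (s : Int)) (some (j : Int)) ++ Arr[j] :: t =
            PySem.List.slice Arr (some (s : Int)) (some ((j + 1 : Nat) : Int)) ++ t := by
          rw [← hc, ← slice_snoc Arr s j hsj hjlt]
          simp
        rw [hx]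

theorem slicesFor_eq (Arr : List Int) (acc : List (List Int)) (d : List Bool)
    (h : d.length + 1 = Arr.length) : slicesFor Arr acc d = acc ++ splitRec Arr d := by
  unfold slicesFor
  have h0 := buildLoop_spec Arr d 0 0 acc (le_refl 0) (by omega)
  simp only [Nat.cast_zero, zero_add] at h0
  rw [h0, List.drop_zero, slice_self]
  cases hsp : splitRec Arr d with
  | nil => exact absurd hsp (splitRec_ne_nil Arr d)
  | cons t r => simp [glue]

theorem foldl_count (l : List Int) (q : Int → Bool) (c : Int) :
    l.foldl (fun c j => if q j then c + 1 else c) c = c + (l.countP q : Int) := by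
  induction l generalizing c with
  | nil => simp
  | cons x l ih =>
    simp only [List.foldl_cons, List.countP_cons, ih]
    split <;> push_cast <;> omega

theorem countP_range_adj : ∀ (s : List Int),
    (PySem.List.pyRange 1 (s.length : Int)).countP
      (fun j => PySem.Int.mod (PySem.List.pyGetD s j 0) (PySem.List.pyGetD s (j - 1) 0) == 0) =
    adjC s := by
  intro s
  induction s with
  | nil => simp [PySem.List.pyRange_one_eq_nil, adjC]
  | cons x s' ih =>
    cases s' with
    | nil => simp [PySem.List.pyRange_one_eq_nil, adjC]
    | cons y ys =>
      rw [PySem.List.pyRange_one_cons (by simp), List.countP_cons]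
      have hq1 : (PySem.Int.mod (PySem.List.pyGetD (x :: y :: ys) 1 0)
          (PySem.List.pyGetD (x :: y :: ys) (1 - 1) 0) == 0) = adjP (x, y) := by
        norm_num [PySem.List.pyGetD_ofNat', adjP]
      have hrest : (PySem.List.pyRange (1 + 1) ((x :: y :: ys).length : Int)).countP
            (fun j => PySem.Int.mod (PySem.List.pyGetD (x :: y :: ys) j 0)
              (PySem.List.pyGetD (x :: y :: ys) (j - 1) 0) == 0) =
          (PySem.List.pyRange 1 ((y :: ys).length : Int)).countP
            (fun j => PySem.Int.mod (PySem.List.pyGetD (y :: ys) j 0)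
              (PySem.List.pyGetD (y :: ys) (j - 1) 0) == 0) := by
        rw [PySem.List.pyRange_one, PySem.List.pyRange_one, List.countP_map, List.countP_map]
        have hm : (((x :: y :: ys).length : Int) - (1 + 1)).toNat = ys.length := by
          simp; omega
        have hm' : (((y :: ys).length : Int) - 1).toNat = ys.length := by simp
        rw [hm, hm']
        apply List.countP_congr
        intro k hk
        simp only [List.mem_range] at hk
        simp only [Function.comp]
        have e1 : (1 : Int) + 1 + (k : Int) = ((k + 1 + 1 : Nat) : Int) := by push_cast; ring
        have e2 : ((k + 1 + 1 : Nat) : Int) - 1 = ((k + 1 : Nat) : Int) := by push_cast; ring_nf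
        have e3 : (1 : Int) + (k : Int) = ((k + 1 : Nat) : Int) := by push_cast; ring
        have e4 : ((k + 1 : Nat) : Int) - 1 = ((k : Nat) : Int) := by push_cast; ring
        rw [e1, e2, e3, e4, PySem.List.pyGetD_natCast, PySem.List.pyGetD_natCast,
          PySem.List.pyGetD_natCast, PySem.List.pyGetD_natCast]
        simp
      rw [hrest, ih]
      simp only [hq1]
      simp [adjC, List.countP_cons]

theorem innerLoop_eq (s : List Int) (c : Int) : innerLoop s c = c + (adjC s : Int) := by
  unfold innerLoop
  rw [foldl_count]
  congr 1
  rw [Nat.cast_inj, PySem.List.pyRange_neg_one_eq_reverse, List.countP_reverse,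
    show (0 : Int) + 1 = 1 from rfl,
    show (s.length : Int) - 1 + 1 = (s.length : Int) by ring]
  exact countP_range_adj s

theorem foldl_slices (L : List (List Int)) (c : Int) :
    L.foldl (fun c s => if 1 ≤ s.length then innerLoop s c else c) c = c + (sumAdj L : Int) := by
  induction L generalizing c with
  | nil => simp [sumAdj]
  | cons s L ih =>
    simp only [List.foldl_cons]
    by_cases h : 1 ≤ s.length
    · rw [if_pos h, innerLoop_eq, ih]
      simp [sumAdj]
      push_cast
      ring
    · rw [if_neg h, ih]
      have hs : s = [] := by
        cases s with
        | nil => rfl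
        | cons a t => simp at h
      simp [hs, sumAdj, adjC]

theorem splitRec_sumAdj : ∀ (d : List Bool) (xs : List Int), xs.length = d.length + 1 →
    sumAdj (splitRec xs d) = (d.zip (xs.zip xs.tail)).countP (fun q => !q.1 && adjP q.2) := by
  intro d
  induction d with
  | nil =>
    intro xs h
    match xs, h with
    | [x], _ => simp [splitRec, sumAdj, adjC]
  | cons b d ih =>
    intro xs h
    match xs, h with
    | x :: xs', h =>
    have hx' : xs'.length = d.length + 1 := by simpa using h
    match xs', hx' with
    | y :: ys, hx' =>
    cases b with
    | true =>
      have := ih (y :: ys) hx'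
      simp only [splitRec, sumAdj, List.map_cons, List.sum_cons, List.zip_cons_cons,
        List.tail_cons, List.countP_cons] at this ⊢
      simp [adjC, this]
    | false =>
      obtain ⟨t, rest, hsp⟩ := splitRec_cons d y ys
      have hih := ih (y :: ys) hx'
      rw [hsp] at hih
      have hsplit : splitRec (x :: y :: ys) (false :: d) = (x :: y :: t) :: rest := by
        simp [splitRec, hsp]
      rw [hsplit]
      simp only [sumAdj, List.map_cons, List.sum_cons, List.zip_cons_cons,
        List.tail_cons] at hih ⊢
      have hadj : adjC (x :: y :: t) = adjC (y :: t) + (if adjP (x, y) then 1 else 0) := by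
        simp [adjC, List.countP_cons]
      rw [hadj]
      simp only [List.countP_cons, Bool.not_false, Bool.true_and]
      by_cases hxy : adjP (x, y) = true <;> simp [hxy] <;> omega

theorem prodTF_mem_length (k : Nat) (d : List Bool) (h : d ∈ prodTF k) : d.length = k := by
  induction k generalizing d with
  | zero => simp [prodTF] at h; simp [h]
  | succ k ih =>
    simp only [prodTF, List.mem_flatMap, List.mem_map] at h
    obtain ⟨b, _, t, ht, rfl⟩ := h
    simp [ih t ht]

theorem prodTF_count (k : Nat) : (prodTF k).length = 2 ^ k := by
  induction k with
  | zero => simp [prodTF]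
  | succ k ih => simp [prodTF, ih]; ring

theorem prodTF_sum : ∀ (k : Nat) (ps : List (Int × Int)), ps.length = k → 1 ≤ k →
    ((prodTF k).map (fun d => (d.zip ps).countP (fun q => !q.1 && adjP q.2))).sum =
      ps.countP adjP * 2 ^ (k - 1) := by
  intro k
  induction k with
  | zero => intro ps h h1; omega
  | succ k ih =>
    intro ps h _
    match ps, h with
    | p :: ps', h =>
    have hps' : ps'.length = k := by simpa using h
    simp only [prodTF, List.flatMap_cons, List.flatMap_nil, List.append_nil,
      List.map_append, List.sum_append, List.map_map]
    have hT : ∀ (b : Bool),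
        ((prodTF k).map ((fun d => (d.zip (p :: ps')).countP (fun q => !q.1 && adjP q.2)) ∘
          (fun t => b :: t))).sum =
        ((prodTF k).map (fun d => (d.zip ps').countP (fun q => !q.1 && adjP q.2))).sum +
          (if (!b && adjP p) then 1 else 0) * (prodTF k).length := by
      intro b
      induction prodTF k with
      | nil => simp
      | cons d ds ihds =>
        simp only [List.map_cons, List.sum_cons, ihds, Function.comp,
          List.zip_cons_cons, List.countP_cons]
        split <;> simp <;> ring
    rw [hT true, hT false]
    simp only [Bool.not_true, Bool.not_false, Bool.false_and, Bool.true_and,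
      if_neg (by simp : ¬ (false = true))]
    rw [prodTF_count]
    cases k with
    | zero =>
      match ps', hps' with
      | [], _ => simp [prodTF, List.countP_cons, adjP]
    | succ k' =>
      rw [ih ps' hps' (by omega)]
      simp only [List.countP_cons, Nat.succ_sub_one]
      have hpow : (2 : Nat) ^ (k' + 1) = 2 ^ k' * 2 := by rw [pow_succ]
      split <;> (simp; rw [hpow]; ring)

theorem foldl_slicesFor (Arr : List Int) : ∀ (ds : List (List Bool)) (acc : List (List Int)),
    (∀ d ∈ ds, d.length + 1 = Arr.length) →
    ds.foldl (slicesFor Arr) acc = acc ++ ds.flatMap (fun d => splitRec Arr d) := by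
  intro ds
  induction ds with
  | nil => intro acc _; simp
  | cons d ds ih =>
    intro acc h
    simp only [List.foldl_cons, List.flatMap_cons]
    rw [slicesFor_eq Arr acc d (h d (by simp)), ih _ (fun d' hd' => h d' (by simp [hd']))]
    simp [List.append_assoc]

theorem sumAdj_flatMap (Arr : List Int) (ds : List (List Bool)) :
    sumAdj (ds.flatMap (fun d => splitRec Arr d)) =
      (ds.map (fun d => sumAdj (splitRec Arr d))).sum := by
  induction ds with
  | nil => simp [sumAdj]
  | cons d ds ih =>
    simp only [List.flatMap_cons, List.map_cons, List.sum_cons, ← ih]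
    simp [sumAdj]

-- ===== VERDICT (by name: the statement is the Claim_ definition above) =====
theorem countDivisibleSubseq_spec : Claim_equal_countDivisibleSubseq := by
  intro N Arr _ hPre
  obtain ⟨hne, -⟩ := hPre
  have hn1 : 1 ≤ Arr.length := by
    cases Arr with
    | nil => exact absurd rfl hne
    | cons a t => simp
  unfold Spec_countDivisibleSubseq countDivisibleSubseq countDivisibleSubseq_alt
  dsimp only
  rw [PySem.List.foldl_pyRange_zero_pyGetD' ((prodTF (Arr.length - 1)).foldl (slicesFor Arr) [])
    [] (fun c s => if 1 ≤ s.length then innerLoop s c else c)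
    ((PySem.Set.ofList Arr).length : Int)]
  rw [foldl_slices]
  rw [foldl_slicesFor Arr (prodTF (Arr.length - 1)) []
    (fun d hd => by rw [prodTF_mem_length _ d hd]; omega)]
  rw [List.nil_append, sumAdj_flatMap]
  rw [List.map_congr_left (fun d hd => splitRec_sumAdj d Arr
    (by rw [prodTF_mem_length _ d hd]; omega))]
  by_cases h2 : Arr.length < 2
  · rw [if_pos h2]
    have h0 : Arr.length - 1 = 0 := by omega
    rw [h0]
    simp [prodTF]
  · rw [if_neg h2]
    have hlen : (Arr.zip Arr.tail).length = Arr.length - 1 := by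
      rw [List.length_zip, List.length_tail]
      omega
    rw [prodTF_sum (Arr.length - 1) (Arr.zip Arr.tail) hlen (by omega)]
    rw [show Arr.length - 1 - 1 = Arr.length - 2 from by omega]
    rw [List.drop_one, ← List.countP_eq_length_filter]
    have hp : (List.countP (fun p => PySem.Int.mod p.2 p.1 == 0) (Arr.zip Arr.tail)) =
        List.countP adjP (Arr.zip Arr.tail) := rfl
    rw [hp]
    push_cast
    ring
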